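-- pv_equiv track=rewrite | github.com/ms86party/muge-chat-bot | src/data_preprocessing/knowledge_loader.py | _chunk_markdown
-- ===== SOURCE A (Python) =====
-- def _chunk_markdown(md: str) -> list[tuple[str, str]]:
--     """`## ` 헤딩 단위로 (heading, body) 리스트 생성. 첫 헤딩 이전 본문은 'intro'."""
--     lines = md.splitlines()
--     chunks: list[tuple[str, str]] = []
--     buf: list[str] = []
--     heading = "intro"
--     for line in lines:
--         if line.startswith("## "):
--             if buf:
--                 chunks.append((heading, "\n".join(buf).strip()))
--             heading = line[3:].strip()
--             buf = []
--         else: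
--             buf.append(line)
--     if buf:
--         chunks.append((heading, "\n".join(buf).strip()))
--     # 비어있는 청크 제거
--     return [(h, b) for h, b in chunks if b]
-- ===== SOURCE B (Python) =====
-- def _chunk_markdown(md: str) -> list[tuple[str, str]]:
--     """Span-based splitter: repeatedly take the run of non-heading lines as the
--     current body, emit it if non-empty after strip, then step past the heading."""
--     out: list[tuple[str, str]] = []
--     heading = "intro"
--     rest = md.splitlines()
--     while True:
--         k = 0
--         while k < len(rest) and not rest[k].startswith("## "):
--             k += 1
--         body = "\n".join(rest[:k]).strip()
--         if body:
--             out.append((heading, body))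
--         if k == len(rest):
--             return out
--         heading, rest = rest[k][3:].strip(), rest[k + 1:]
-- ===== Notes on version B (the rewrite author's own statement) =====
-- stated objective: alternative
-- what changed: A accumulates lines into a buffer with a trailing flush and a final filter pass; B is a span-based splitter that repeatedly scans to the next '## ' heading, slices that run out as the segment body and emits it immediately if non-empty.
import Mathlib
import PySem

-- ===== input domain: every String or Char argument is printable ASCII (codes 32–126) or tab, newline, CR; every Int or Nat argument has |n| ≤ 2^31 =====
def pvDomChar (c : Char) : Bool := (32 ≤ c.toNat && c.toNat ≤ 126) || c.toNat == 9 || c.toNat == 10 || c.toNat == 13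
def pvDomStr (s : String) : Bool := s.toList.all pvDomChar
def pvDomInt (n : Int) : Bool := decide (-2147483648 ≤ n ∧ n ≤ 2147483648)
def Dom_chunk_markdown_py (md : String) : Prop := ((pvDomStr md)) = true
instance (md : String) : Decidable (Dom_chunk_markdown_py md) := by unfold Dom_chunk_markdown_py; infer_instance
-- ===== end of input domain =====

-- B replaces A's line-by-line buffer accumulation (with a trailing flush and a final
-- filter pass) by a span-based splitter that repeatedly takes the run of non-heading
-- lines as a segment; same cost, different decomposition (objective: alternative).

-- ===== PORT A =====
-- loop body of A's for-loop, state = (chunks, buf, heading)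
def chunkStepA (s : List (String × String) × List String × String) (line : String) :
    List (String × String) × List String × String :=
  if PySem.Str.startswith line "## " then
    ((if s.2.1 ≠ [] then s.1 ++ [(s.2.2, PySem.Str.strip (PySem.Str.join "\n" s.2.1))] else s.1),
     [], PySem.Str.strip (PySem.Str.slice line (some 3) none))
  else
    (s.1, s.2.1 ++ [line], s.2.2)

def chunk_markdown_py (md : String) : List (String × String) :=
  let st := (PySem.Str.splitlines md).foldl chunkStepA ([], [], "intro")
  let chunks :=
    if st.2.1 ≠ [] then st.1 ++ [(st.2.2, PySem.Str.strip (PySem.Str.join "\n" st.2.1))]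
    else st.1
  chunks.filter (fun p => !(p.2 == ""))

-- ===== PORT B =====
-- B's outer while-loop: the inner index scan `k` is the length of the run of
-- non-heading lines, i.e. rest[:k] = takeWhile, rest[k:] = dropWhile (exact).
def chunkAltGo (heading : String) (rest : List String) : List (String × String) :=
  let suf := rest.dropWhile (fun l => !(PySem.Str.startswith l "## "))
  let body := PySem.Str.strip (PySem.Str.join "\n"
    (rest.takeWhile (fun l => !(PySem.Str.startswith l "## "))))
  (if body ≠ "" then [(heading, body)] else []) ++
    (if hsuf : suf = [] then []
     else chunkAltGo (PySem.Str.strip (PySem.Str.slice suf.headI (some 3) none)) suf.tail)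
termination_by rest.length
decreasing_by
  rcases hc : List.dropWhile (fun l => !(PySem.Str.startswith l "## ")) rest with _ | ⟨a, t⟩
  · exact absurd hc hsuf
  · have h := List.length_dropWhile_le (p := fun l => !(PySem.Str.startswith l "## ")) (l := rest)
    rw [hc] at h
    simp at h ⊢
    omega

def chunk_markdown_py_alt (md : String) : List (String × String) :=
  chunkAltGo "intro" (PySem.Str.splitlines md)

-- ===== PRECONDITION & SPEC =====
def Spec_chunk_markdown_py (md : String) (out : List (String × String)) : Prop := out = chunk_markdown_py_alt md
instance (md : String) (out : List (String × String)) : Decidable (Spec_chunk_markdown_py md out) := by unfold Spec_chunk_markdown_py; infer_instance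

-- ===== CLAIM (what is proved, stated in full; the proofs are below) =====
def Claim_equal_chunk_markdown_py : Prop := ∀ (md : String), Dom_chunk_markdown_py md → Spec_chunk_markdown_py md (chunk_markdown_py md)

-- ===== LEMMAS AND PROOFS =====

-- the chunk A's flush emits, after the final non-empty filter
def emitC (heading : String) (buf : List String) : List (String × String) :=
  if PySem.Str.strip (PySem.Str.join "\n" buf) ≠ ""
  then [(heading, PySem.Str.strip (PySem.Str.join "\n" buf))] else []

-- A's loop rephrased as structural recursion on the remaining lines
def goC (heading : String) (buf : List String) : List String → List (String × String)
  | [] => emitC heading buf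
  | l :: ls =>
    if PySem.Str.startswith l "## " then
      emitC heading buf ++ goC (PySem.Str.strip (PySem.Str.slice l (some 3) none)) [] ls
    else
      goC heading (buf ++ [l]) ls

theorem flush_filter (chunks : List (String × String)) (buf : List String) (heading : String) :
    (if buf ≠ [] then chunks ++ [(heading, PySem.Str.strip (PySem.Str.join "\n" buf))]
     else chunks).filter (fun p => !(p.2 == ""))
    = chunks.filter (fun p => !(p.2 == "")) ++ emitC heading buf := by
  rcases buf with _ | ⟨b, bs⟩
  · simp [emitC, show PySem.Str.strip (PySem.Str.join "\n" []) = "" from rfl]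
  · simp only [emitC, ne_eq, reduceCtorEq, not_false_eq_true, if_true, List.filter_append]
    by_cases h : PySem.Str.strip (PySem.Str.join "\n" (b :: bs)) = ""
    · simp [List.filter, h]
    · have hb : (PySem.Str.strip (PySem.Str.join "\n" (b :: bs)) == "") = false :=
        beq_eq_false_iff_ne.mpr h
      simp [List.filter, h, hb]

theorem fold_to_goC (lines : List String) :
    ∀ (chunks : List (String × String)) (buf : List String) (heading : String),
    (let st := lines.foldl chunkStepA (chunks, buf, heading);
     (if st.2.1 ≠ [] then st.1 ++ [(st.2.2, PySem.Str.strip (PySem.Str.join "\n" st.2.1))]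
      else st.1).filter (fun p => !(p.2 == "")))
    = chunks.filter (fun p => !(p.2 == "")) ++ goC heading buf lines := by
  induction lines with
  | nil =>
    intro chunks buf heading
    simpa [goC] using flush_filter chunks buf heading
  | cons l ls ih =>
    intro chunks buf heading
    simp only [List.foldl_cons]
    by_cases hP : PySem.Str.startswith l "## "
    · simp only [chunkStepA, hP, if_true]
      rw [ih, flush_filter]
      simp only [goC, hP, if_true]
      rw [List.append_assoc]
    · simp only [chunkStepA, hP, Bool.false_eq_true, if_false]
      rw [ih]
      simp only [goC, hP, Bool.false_eq_true, if_false]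

theorem takeWhile_all {α : Type} (p : α → Bool) (buf : List α)
    (h : ∀ x ∈ buf, p x = true) : buf.takeWhile p = buf := by
  induction buf with
  | nil => rfl
  | cons b bs ih =>
    simp [h b (by simp), ih (fun x hx => h x (by simp [hx]))]

theorem dropWhile_all {α : Type} (p : α → Bool) (buf : List α)
    (h : ∀ x ∈ buf, p x = true) : buf.dropWhile p = [] := by
  induction buf with
  | nil => rfl
  | cons b bs ih =>
    simp [h b (by simp), ih (fun x hx => h x (by simp [hx]))]

theorem takeWhile_stop {α : Type} (p : α → Bool) (buf : List α) (l : α) (ls : List α)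
    (h : ∀ x ∈ buf, p x = true) (hl : p l = false) :
    (buf ++ l :: ls).takeWhile p = buf := by
  induction buf with
  | nil => simp [hl]
  | cons b bs ih =>
    simp [h b (by simp), ih (fun x hx => h x (by simp [hx]))]

theorem dropWhile_stop {α : Type} (p : α → Bool) (buf : List α) (l : α) (ls : List α)
    (h : ∀ x ∈ buf, p x = true) (hl : p l = false) :
    (buf ++ l :: ls).dropWhile p = l :: ls := by
  induction buf with
  | nil => simp [hl]
  | cons b bs ih =>
    simp [h b (by simp), ih (fun x hx => h x (by simp [hx]))]

-- unfolding lemmas for chunkAltGo, keyed by where the scan stops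
theorem chunkAltGo_of_drop_nil (heading : String) (rest : List String)
    (h : rest.dropWhile (fun l => !(PySem.Str.startswith l "## ")) = []) :
    chunkAltGo heading rest
      = emitC heading (rest.takeWhile (fun l => !(PySem.Str.startswith l "## "))) := by
  rw [chunkAltGo.eq_def, h]
  simp [emitC]

theorem chunkAltGo_of_drop_cons (heading : String) (rest : List String) (l : String)
    (t : List String)
    (h : rest.dropWhile (fun l => !(PySem.Str.startswith l "## ")) = l :: t) :
    chunkAltGo heading rest
      = emitC heading (rest.takeWhile (fun l => !(PySem.Str.startswith l "## ")))
        ++ chunkAltGo (PySem.Str.strip (PySem.Str.slice l (some 3) none)) t := by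
  rw [chunkAltGo.eq_def, h]
  simp [emitC]

theorem goC_to_alt (lines : List String) :
    ∀ (buf : List String) (heading : String),
    (∀ l ∈ buf, PySem.Str.startswith l "## " = false) →
    goC heading buf lines = chunkAltGo heading (buf ++ lines) := by
  induction lines with
  | nil =>
    intro buf heading hb
    rw [List.append_nil,
      chunkAltGo_of_drop_nil heading buf
        (dropWhile_all _ buf (fun x hx => by simpa using hb x hx)),
      takeWhile_all _ buf (fun x hx => by simpa using hb x hx)]
    rfl
  | cons l ls ih =>
    intro buf heading hb
    by_cases hP : PySem.Str.startswith l "## "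
    · rw [chunkAltGo_of_drop_cons heading (buf ++ l :: ls) l ls
        (dropWhile_stop _ buf l ls (fun x hx => by simpa using hb x hx) (by simpa using hP)),
        takeWhile_stop _ buf l ls (fun x hx => by simpa using hb x hx) (by simpa using hP)]
      have hrec := ih [] (PySem.Str.strip (PySem.Str.slice l (some 3) none)) (by simp)
      rw [List.nil_append] at hrec
      simp only [goC, hP, if_true, hrec]
    · have hstep : goC heading buf (l :: ls) = goC heading (buf ++ [l]) ls := by
        simp only [goC, hP, Bool.false_eq_true, if_false]
      rw [hstep, ih (buf ++ [l]) heading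
        (by intro x hx
            rcases List.mem_append.1 hx with hx | hx
            · exact hb x hx
            · simp at hx; subst hx; simpa using hP),
        List.append_assoc, List.singleton_append]

-- ===== VERDICT (by name: the statement is the Claim_ definition above) =====
theorem chunk_markdown_py_spec : Claim_equal_chunk_markdown_py := by
  intro md _
  show chunk_markdown_py md = chunk_markdown_py_alt md
  unfold chunk_markdown_py chunk_markdown_py_alt
  have h1 := fold_to_goC (PySem.Str.splitlines md) [] [] "intro"
  have h2 := goC_to_alt (PySem.Str.splitlines md) [] "intro" (by simp)
  rw [List.nil_append] at h2
  simpa [h2] using h1
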